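-- pv_equiv track=rewrite | github.com/zavora-ai/wanjiku-tts | scripts/normalize_text.py | _expand_number
-- ===== SOURCE A (Python) =====
-- _NUMBERS = {
--     0: 'hatarĩ', 1: 'ĩmwe', 2: 'igĩrĩ', 3: 'ithatu', 4: 'inya',
--     5: 'ithano', 6: 'ithathatu', 7: 'mũgwanja', 8: 'inyanya',
--     9: 'kenda', 10: 'ikũmi',
--     20: 'mĩrongo ĩĩrĩ', 30: 'mĩrongo ĩtatũ', 40: 'mĩrongo ĩna',
--     50: 'mĩrongo ĩtano', 60: 'mĩrongo ĩtandatũ', 70: 'mĩrongo mũgwanja',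
--     80: 'mĩrongo ĩnana', 90: 'mĩrongo kenda', 100: 'igana',
--     1000: 'ngiri',
-- }
--
-- def _expand_number(n):
--     """Expand integer to Kikuyu words (basic, up to 9999)."""
--     if n in _NUMBERS:
--         return _NUMBERS[n]
--     if n < 0:
--         return 'thaĩ ' + _expand_number(-n)
--     if n < 20:
--         return f'ikũmi na {_NUMBERS[n - 10]}'
--     if n < 100:
--         tens = (n // 10) * 10
--         ones = n % 10
--         if ones == 0:
--             return _NUMBERS[tens]
--         return f'{_NUMBERS[tens]} na {_NUMBERS[ones]}'
--     if n < 1000: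
--         h = n // 100
--         rest = n % 100
--         prefix = f'magana {_NUMBERS[h]}' if h > 1 else 'igana'
--         if rest == 0:
--             return prefix
--         return f'{prefix} na {_expand_number(rest)}'
--     if n < 10000:
--         t = n // 1000
--         rest = n % 1000
--         prefix = f'ngiri {_NUMBERS[t]}' if t > 1 else 'ngiri'
--         if rest == 0:
--             return prefix
--         return f'{prefix} na {_expand_number(rest)}'
--     return str(n)
-- ===== SOURCE B (Python) =====
-- _NUMBERS = {
--     0: 'hatarĩ', 1: 'ĩmwe', 2: 'igĩrĩ', 3: 'ithatu', 4: 'inya',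
--     5: 'ithano', 6: 'ithathatu', 7: 'mũgwanja', 8: 'inyanya',
--     9: 'kenda', 10: 'ikũmi',
--     20: 'mĩrongo ĩĩrĩ', 30: 'mĩrongo ĩtatũ', 40: 'mĩrongo ĩna',
--     50: 'mĩrongo ĩtano', 60: 'mĩrongo ĩtandatũ', 70: 'mĩrongo mũgwanja',
--     80: 'mĩrongo ĩnana', 90: 'mĩrongo kenda', 100: 'igana',
--     1000: 'ngiri',
-- }
--
--
-- def _sub100(r):
--     """Word for 0 < r < 100."""
--     tens, ones = divmod(r, 10)
--     if ones == 0: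
--         return _NUMBERS[tens * 10]
--     if tens == 0:
--         return _NUMBERS[ones]
--     return f'{_NUMBERS[tens * 10]} na {_NUMBERS[ones]}'
--
--
-- def _parts(m):
--     """Nonempty segment list for 0 < m < 10000 (place-value sweep, no recursion)."""
--     parts = []
--     t, r = divmod(m, 1000)
--     if t:
--         parts.append('ngiri' if t == 1 else f'ngiri {_NUMBERS[t]}')
--     h, r = divmod(r, 100)
--     if h:
--         parts.append('igana' if h == 1 else f'magana {_NUMBERS[h]}')
--     if r:
--         parts.append(_sub100(r))
--     return parts
--
--
-- def _expand_number(n):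
--     """Expand integer to Kikuyu words (basic, up to 9999)."""
--     if n in _NUMBERS:
--         return _NUMBERS[n]
--     sign, m = ('thaĩ ', -n) if n < 0 else ('', n)
--     if m in _NUMBERS:
--         return sign + _NUMBERS[m]
--     if m >= 10000:
--         return sign + str(m)
--     return sign + ' na '.join(_parts(m))
-- ===== Notes on version B (the rewrite author's own statement) =====
-- stated objective: alternative
-- what changed: Replaces A's four-way recursive branch cascade with an iterative place-value builder: B strips the sign once, short-circuits on the dict and on the out-of-range str(n) fallback, then collects thousands/hundreds/sub-100 segments into a list and joins them with ' na ' instead of recursing on the remainder.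
import Mathlib
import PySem

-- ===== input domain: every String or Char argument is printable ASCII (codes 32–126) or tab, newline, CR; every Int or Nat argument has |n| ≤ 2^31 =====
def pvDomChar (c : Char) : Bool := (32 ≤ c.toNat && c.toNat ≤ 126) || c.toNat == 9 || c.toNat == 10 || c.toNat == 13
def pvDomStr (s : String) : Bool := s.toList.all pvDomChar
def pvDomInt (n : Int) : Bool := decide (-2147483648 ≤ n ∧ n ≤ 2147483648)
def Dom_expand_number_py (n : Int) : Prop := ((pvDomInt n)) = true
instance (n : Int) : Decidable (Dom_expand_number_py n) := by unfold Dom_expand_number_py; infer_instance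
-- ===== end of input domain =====

-- B rewrites A's branch-cascade recursion as an iterative place-value builder: it collects the
-- thousands / hundreds / sub-100 segments into a list and joins them with " na " (objective: alternative).

-- ===== PORT A =====
-- the module-level _NUMBERS dict
def NUMBERS : PySem.Dict Int String := PySem.Dict.mk [
  (0, "hatarĩ"), (1, "ĩmwe"), (2, "igĩrĩ"), (3, "ithatu"), (4, "inya"),
  (5, "ithano"), (6, "ithathatu"), (7, "mũgwanja"), (8, "inyanya"),
  (9, "kenda"), (10, "ikũmi"),
  (20, "mĩrongo ĩĩrĩ"), (30, "mĩrongo ĩtatũ"), (40, "mĩrongo ĩna"),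
  (50, "mĩrongo ĩtano"), (60, "mĩrongo ĩtandatũ"), (70, "mĩrongo mũgwanja"),
  (80, "mĩrongo ĩnana"), (90, "mĩrongo kenda"), (100, "igana"),
  (1000, "ngiri")]

-- A's recursion, fuelled: Python's call depth is at most 4 (negative → positive → hundreds-rest →
-- tens-rest), so fuel 4 makes the recursion structural without changing any computed value;
-- the fuel-0 branch is unreachable from expand_number_py.  Dict hits (`n in _NUMBERS` then
-- `_NUMBERS[n]`) are the one get?; `_NUMBERS[k]` on keys proven present is getD with an unused default.
def expandGo : Nat → Int → String
  | 0, _ => ""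
  | fuel + 1, n =>
    match NUMBERS.get? n with
    | some w => w
    | none =>
      if n < 0 then "thaĩ " ++ expandGo fuel (-n)
      else if n < 20 then "ikũmi na " ++ NUMBERS.getD (n - 10) ""
      else if n < 100 then
        let tens := PySem.Int.floordiv n 10 * 10
        let ones := PySem.Int.mod n 10
        if ones = 0 then NUMBERS.getD tens ""
        else NUMBERS.getD tens "" ++ " na " ++ NUMBERS.getD ones ""
      else if n < 1000 then
        let h := PySem.Int.floordiv n 100
        let rest := PySem.Int.mod n 100
        let pre := if h > 1 then "magana " ++ NUMBERS.getD h "" else "igana"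
        if rest = 0 then pre else pre ++ " na " ++ expandGo fuel rest
      else if n < 10000 then
        let t := PySem.Int.floordiv n 1000
        let rest := PySem.Int.mod n 1000
        let pre := if t > 1 then "ngiri " ++ NUMBERS.getD t "" else "ngiri"
        if rest = 0 then pre else pre ++ " na " ++ expandGo fuel rest
      else PySem.Int.toStr n

def expand_number_py (n : Int) : String := expandGo 4 n

-- ===== PORT B =====
-- Source B _sub100
def kikuyuSub100 (r : Int) : String :=
  let tens := PySem.Int.floordiv r 10
  let ones := PySem.Int.mod r 10
  if ones = 0 then NUMBERS.getD (tens * 10) ""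
  else if tens = 0 then NUMBERS.getD ones ""
  else NUMBERS.getD (tens * 10) "" ++ " na " ++ NUMBERS.getD ones ""

-- Source B _parts (the appends to the `parts` list, written as list concatenation)
def kikuyuParts (m : Int) : List String :=
  let t := PySem.Int.floordiv m 1000
  let r1 := PySem.Int.mod m 1000
  let h := PySem.Int.floordiv r1 100
  let r2 := PySem.Int.mod r1 100
  (if t ≠ 0 then [if t = 1 then "ngiri" else "ngiri " ++ NUMBERS.getD t ""] else []) ++
  (if h ≠ 0 then [if h = 1 then "igana" else "magana " ++ NUMBERS.getD h ""] else []) ++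
  (if r2 ≠ 0 then [kikuyuSub100 r2] else [])

def expand_number_py_alt (n : Int) : String :=
  match NUMBERS.get? n with
  | some w => w
  | none =>
    let sign := if n < 0 then "thaĩ " else ""
    let m := if n < 0 then -n else n
    match NUMBERS.get? m with
    | some w => sign ++ w
    | none =>
      if m ≥ 10000 then sign ++ PySem.Int.toStr m
      else sign ++ PySem.Str.join " na " (kikuyuParts m)


-- ===== PRECONDITION & SPEC =====
def Spec_expand_number_py (n : Int) (out : String) : Prop := out = expand_number_py_alt n
instance (n : Int) (out : String) : Decidable (Spec_expand_number_py n out) := by unfold Spec_expand_number_py; infer_instance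

-- ===== CLAIM (what is proved, stated in full; the proofs are below) =====
def Claim_equal_expand_number_py : Prop := ∀ (n : Int), Dom_expand_number_py n → Spec_expand_number_py n (expand_number_py n)

-- ===== LEMMAS AND PROOFS =====

-- the dict has no negative key, no key in (100,1000), none above 1000
lemma numbers_get?_none (n : Int) (h : n < 0 ∨ (100 < n ∧ n < 1000) ∨ 1000 < n) :
    NUMBERS.get? n = none := by
  simp only [PySem.Dict.get?, NUMBERS, Option.map_eq_none_iff, List.find?_eq_none, List.mem_cons,
    List.not_mem_nil, or_false, beq_iff_eq, forall_eq_or_imp, forall_eq]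
  omega

lemma str_join_singleton (s a : String) : PySem.Str.join s [a] = a := by
  simp [PySem.Str.join, PySem.Chars.join_singleton]

lemma str_join_cons (s a : String) (l : List String) (h : l ≠ []) :
    PySem.Str.join s (a :: l) = a ++ s ++ PySem.Str.join s l := by
  cases l with
  | nil => exact absurd rfl h
  | cons b t =>
    simp [PySem.Str.join, PySem.Chars.join_cons_cons, String.append_assoc]

-- fuel does not matter for A's port on 0 ≤ n ≤ 100: no reachable recursive call
lemma go_fuel_low (f g : Nat) (n : Int) (h0 : 0 ≤ n) (h1 : n ≤ 100) :
    expandGo (f + 1) n = expandGo (g + 1) n := by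
  simp only [expandGo]
  cases hg : NUMBERS.get? n with
  | some w => rfl
  | none =>
    by_cases h2 : n < 20
    · simp [h2, show ¬ n < 0 by omega]
    · by_cases h3 : n < 100
      · simp [h2, h3, show ¬ n < 0 by omega]
      · -- n = 100, not in the dict: the hundreds branch with rest = 0, no recursion
        have : n = 100 := by omega
        subst this
        norm_num [show PySem.Int.mod 100 100 = 0 from rfl]

-- decided base case: A's sub-100 recursive call equals B's _sub100 (fuel 1 suffices there)
set_option maxHeartbeats 1000000 in
lemma sub1 : ∀ r : Nat, r < 100 → 0 < r → expandGo 1 (r : Int) = kikuyuSub100 (r : Int) := by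
  decide

lemma subEq (f : Nat) (r : Int) (h0 : 0 < r) (h1 : r < 100) :
    expandGo (f + 1) r = kikuyuSub100 r := by
  obtain ⟨k, rfl⟩ : ∃ k : Nat, r = (k : Int) := ⟨r.toNat, by omega⟩
  rw [go_fuel_low f 0 k (by omega) (by omega)]
  exact sub1 k (by omega) (by omega)

-- decided base cases on 0 < m ≤ 100 (fuel 2): against the joined part list and against B itself
set_option maxHeartbeats 1000000 in
lemma mid_low : ∀ r : Nat, r < 101 → 0 < r →
    expandGo 2 (r : Int) = PySem.Str.join " na " (kikuyuParts (r : Int)) := by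
  decide

set_option maxHeartbeats 1000000 in
lemma low_alt : ∀ m : Nat, m < 101 → expandGo 2 (m : Int) = expand_number_py_alt (m : Int) := by
  decide

-- A's recursive sub-call on 0 < r < 1000 is B's joined part list
lemma midEq (f : Nat) (r : Int) (h0 : 0 < r) (h1 : r < 1000) :
    expandGo (f + 2) r = PySem.Str.join " na " (kikuyuParts r) := by
  by_cases hlow : r ≤ 100
  · obtain ⟨k, rfl⟩ : ∃ k : Nat, r = (k : Int) := ⟨r.toNat, by omega⟩
    rw [go_fuel_low (f + 1) 1 k (by omega) (by omega), show (1:Nat) + 1 = 2 from rfl]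
    exact mid_low k (by omega) (by omega)
  · -- 100 < r < 1000
    have hg : NUMBERS.get? r = none := numbers_get?_none r (by omega)
    have hfd : PySem.Int.floordiv r 100 = r / 100 :=
      PySem.Int.floordiv_eq_ediv_of_pos (by norm_num)
    have hmd : PySem.Int.mod r 100 = r % 100 :=
      PySem.Int.mod_eq_emod_of_pos (by norm_num)
    have ht : PySem.Int.floordiv r 1000 = 0 := by
      rw [PySem.Int.floordiv_eq_ediv_of_pos (by norm_num)]; omega
    have hr1 : PySem.Int.mod r 1000 = r := by
      rw [PySem.Int.mod_eq_emod_of_pos (by norm_num)]; omega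
    conv_lhs => rw [expandGo]
    rw [hg]
    dsimp only
    rw [if_neg (show ¬ r < 0 by omega), if_neg (show ¬ r < 20 by omega),
        if_neg (show ¬ r < 100 by omega), if_pos (show r < 1000 by omega)]
    simp only [kikuyuParts, ht, hr1, hfd, hmd]
    rw [if_neg (show ¬ (0:Int) ≠ 0 by simp)]
    simp only [List.nil_append]
    rw [if_pos (show (r / 100 : Int) ≠ 0 by omega)]
    by_cases hrest : r % 100 = 0
    · rw [if_pos hrest, if_neg (show ¬ (r % 100 : Int) ≠ 0 by omega), List.append_nil,
          str_join_singleton]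
      by_cases hone : r / 100 = 1
      · rw [if_neg (show ¬ (r / 100 : Int) > 1 by omega), if_pos hone]
      · rw [if_pos (show (r / 100 : Int) > 1 by omega), if_neg hone]
    · rw [if_neg hrest, if_pos (show (r % 100 : Int) ≠ 0 by omega),
          List.cons_append, List.nil_append,
          str_join_cons _ _ _ (by simp), str_join_singleton,
          subEq f (r % 100) (by omega) (by omega)]
      by_cases hone : r / 100 = 1
      · rw [if_neg (show ¬ (r / 100 : Int) > 1 by omega), if_pos hone]
      · rw [if_pos (show (r / 100 : Int) > 1 by omega), if_neg hone]

-- B on a non-dict value 0 ≤ n < 10000 is the joined part list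
lemma altPos (n : Int) (h0 : 0 ≤ n) (h1 : n < 10000) (hg : NUMBERS.get? n = none) :
    expand_number_py_alt n = PySem.Str.join " na " (kikuyuParts n) := by
  unfold expand_number_py_alt
  rw [hg]
  simp only [if_neg (show ¬ n < 0 by omega)]
  rw [hg, if_neg (show ¬ n ≥ 10000 by omega), String.empty_append]

lemma parts_ne_nil (r : Int) (h0 : 0 < r) (h1 : r < 1000) : kikuyuParts r ≠ [] := by
  have hr1 : PySem.Int.mod r 1000 = r := by
    rw [PySem.Int.mod_eq_emod_of_pos (by norm_num)]; omega
  have hfd : PySem.Int.floordiv r 100 = r / 100 :=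
    PySem.Int.floordiv_eq_ediv_of_pos (by norm_num)
  have hmd : PySem.Int.mod r 100 = r % 100 :=
    PySem.Int.mod_eq_emod_of_pos (by norm_num)
  simp only [kikuyuParts, hr1, hfd, hmd]
  by_cases hh : (r / 100 : Int) = 0
  · have hr2 : (r % 100 : Int) ≠ 0 := by omega
    simp [hh, hr2]
  · simp [hh]

-- on 1000 < m < 10000 the part list is the thousands segment consed on the rest's parts
lemma parts_high (m : Int) (h0 : 1000 < m) (h1 : m < 10000) :
    kikuyuParts m =
      (if PySem.Int.floordiv m 1000 = 1 then "ngiri"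
        else "ngiri " ++ NUMBERS.getD (PySem.Int.floordiv m 1000) "")
        :: kikuyuParts (PySem.Int.mod m 1000) := by
  have hfd : PySem.Int.floordiv m 1000 = m / 1000 :=
    PySem.Int.floordiv_eq_ediv_of_pos (by norm_num)
  have hmd : PySem.Int.mod m 1000 = m % 1000 :=
    PySem.Int.mod_eq_emod_of_pos (by norm_num)
  have ht0 : PySem.Int.floordiv (m % 1000) 1000 = 0 := by
    rw [PySem.Int.floordiv_eq_ediv_of_pos (by norm_num)]; omega
  have hm0 : PySem.Int.mod (m % 1000) 1000 = m % 1000 := by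
    rw [PySem.Int.mod_eq_emod_of_pos (by norm_num)]; omega
  conv_lhs => simp only [kikuyuParts]
  conv_rhs => simp only [kikuyuParts]
  simp only [hfd, hmd, ht0, hm0]
  rw [if_pos (show (m / 1000 : Int) ≠ 0 by omega), if_neg (show ¬ (0:Int) ≠ 0 by simp)]
  simp only [List.nil_append, List.cons_append]

-- the main positive case, parametric in fuel (A's one recursive call gets fuel f + 2)
lemma posEq (f : Nat) (m : Int) (h0 : 0 ≤ m) (h1 : m < 10000) :
    expandGo (f + 3) m = expand_number_py_alt m := by
  by_cases hlow : m ≤ 100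
  · obtain ⟨k, rfl⟩ : ∃ k : Nat, m = (k : Int) := ⟨m.toNat, by omega⟩
    rw [go_fuel_low (f + 2) 1 k (by omega) (by omega), show (1:Nat) + 1 = 2 from rfl]
    exact low_alt k (by omega)
  · by_cases hmid : m < 1000
    · -- 100 < m < 1000
      have hg : NUMBERS.get? m = none := numbers_get?_none m (by omega)
      rw [show f + 3 = (f + 1) + 2 from rfl, midEq (f + 1) m (by omega) (by omega),
          altPos m h0 h1 hg]
    · by_cases h1000 : m = 1000
      · subst h1000
        simp only [expandGo, show NUMBERS.get? (1000 : Int) = some "ngiri" from rfl]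
        rfl
      · -- 1000 < m < 10000
        have hg : NUMBERS.get? m = none := numbers_get?_none m (by omega)
        have hfd : PySem.Int.floordiv m 1000 = m / 1000 :=
          PySem.Int.floordiv_eq_ediv_of_pos (by norm_num)
        have hmd : PySem.Int.mod m 1000 = m % 1000 :=
          PySem.Int.mod_eq_emod_of_pos (by norm_num)
        rw [altPos m h0 h1 hg, parts_high m (by omega) (by omega)]
        conv_lhs => rw [expandGo]
        rw [hg]
        dsimp only
        rw [if_neg (show ¬ m < 0 by omega), if_neg (show ¬ m < 20 by omega),
            if_neg (show ¬ m < 100 by omega), if_neg (show ¬ m < 1000 by omega),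
            if_pos (show m < 10000 by omega)]
        simp only [hfd, hmd]
        by_cases hrest : m % 1000 = 0
        · rw [if_pos hrest, hrest, show kikuyuParts (0 : Int) = [] from rfl, str_join_singleton]
          by_cases hone : m / 1000 = 1
          · rw [if_neg (show ¬ (m / 1000 : Int) > 1 by omega), if_pos hone]
          · rw [if_pos (show (m / 1000 : Int) > 1 by omega), if_neg hone]
        · rw [if_neg hrest,
              str_join_cons _ _ _ (parts_ne_nil (m % 1000) (by omega) (by omega)),
              midEq f (m % 1000) (by omega) (by omega)]
          by_cases hone : m / 1000 = 1
          · rw [if_neg (show ¬ (m / 1000 : Int) > 1 by omega), if_pos hone]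
          · rw [if_pos (show (m / 1000 : Int) > 1 by omega), if_neg hone]

lemma bigA (f : Nat) (n : Int) (h : 10000 ≤ n) : expandGo (f + 1) n = PySem.Int.toStr n := by
  have hg : NUMBERS.get? n = none := numbers_get?_none n (by omega)
  simp only [expandGo, hg]
  rw [if_neg (show ¬ n < 0 by omega), if_neg (show ¬ n < 20 by omega),
      if_neg (show ¬ n < 100 by omega), if_neg (show ¬ n < 1000 by omega),
      if_neg (show ¬ n < 10000 by omega)]

lemma bigB (n : Int) (h : 10000 ≤ n) : expand_number_py_alt n = PySem.Int.toStr n := by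
  have hg : NUMBERS.get? n = none := numbers_get?_none n (by omega)
  unfold expand_number_py_alt
  rw [hg]
  simp only [if_neg (show ¬ n < 0 by omega)]
  rw [hg, if_pos (show n ≥ 10000 by omega), String.empty_append]

lemma negA (f : Nat) (n : Int) (h : n < 0) : expandGo (f + 1) n = "thaĩ " ++ expandGo f (-n) := by
  have hg : NUMBERS.get? n = none := numbers_get?_none n (Or.inl h)
  simp only [expandGo, hg]
  rw [if_pos h]

lemma negB (n : Int) (h : n < 0) :
    expand_number_py_alt n = "thaĩ " ++ expand_number_py_alt (-n) := by
  have hg : NUMBERS.get? n = none := numbers_get?_none n (Or.inl h)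
  unfold expand_number_py_alt
  rw [hg]
  simp only [if_pos h, if_neg (show ¬ -n < 0 by omega)]
  cases hg2 : NUMBERS.get? (-n) with
  | some w => rfl
  | none =>
    by_cases hbig : -n ≥ 10000
    · rw [if_pos hbig, if_pos hbig, String.empty_append]
    · rw [if_neg hbig, if_neg hbig, String.empty_append]

-- ===== VERDICT (by name: the statement is the Claim_ definition above) =====
theorem expand_number_py_spec : Claim_equal_expand_number_py := by
  intro n _
  unfold Spec_expand_number_py expand_number_py
  rcases lt_or_ge n 0 with hneg | hpos
  · rw [negA 3 n hneg, negB n hneg]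
    rcases lt_or_ge (-n) 10000 with hlt | hge
    · rw [posEq 0 (-n) (by omega) hlt]
    · rw [bigA 2 (-n) hge, bigB (-n) hge]
  · rcases lt_or_ge n 10000 with hlt | hge
    · exact posEq 1 n hpos hlt
    · rw [bigA 3 n hge, bigB n hge]
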